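-- pv_equiv track=rewrite | github.com/MaximMelnyk/launchpad42 | backend/app/services/gamification_service.py | _next_sm2_interval
-- ===== SOURCE A (Python) =====
-- SM2_INTERVALS: list[int] = [3, 5, 8, 14, 30]
--
-- def _next_sm2_interval(current_interval: int) -> int:
--     """Advance to the next SM-2 lite interval.
--
--     Progression: 3 -> 5 -> 8 -> 14 -> 30 -> 30 (cap)
--     """
--     try:
--         idx = SM2_INTERVALS.index(current_interval)
--         if idx < len(SM2_INTERVALS) - 1:
--             return SM2_INTERVALS[idx + 1]
--         return SM2_INTERVALS[-1]
--     except ValueError: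
--         # If current interval is not standard, find the closest next
--         for iv in SM2_INTERVALS:
--             if iv > current_interval:
--                 return iv
--         return SM2_INTERVALS[-1]
-- ===== SOURCE B (Python) =====
-- SM2_INTERVALS: list[int] = [3, 5, 8, 14, 30]
--
-- def _next_sm2_interval(current_interval: int) -> int:
--     """Binary search (bisect_right by hand) for the first interval > current, capped at the last."""
--     lo, hi = 0, len(SM2_INTERVALS)
--     while lo < hi:
--         mid = (lo + hi) // 2
--         if current_interval < SM2_INTERVALS[mid]:
--             hi = mid
--         else:
--             lo = mid + 1
--     if lo < len(SM2_INTERVALS):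
--         return SM2_INTERVALS[lo]
--     return SM2_INTERVALS[-1]
-- ===== Notes on version B (the rewrite author's own statement) =====
-- stated objective: alternative
-- what changed: Replaced the index()/try-except plus linear fallback scan with a single hand-written bisect_right binary search over the sorted interval table, then one bounded index lookup.
import Mathlib
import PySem

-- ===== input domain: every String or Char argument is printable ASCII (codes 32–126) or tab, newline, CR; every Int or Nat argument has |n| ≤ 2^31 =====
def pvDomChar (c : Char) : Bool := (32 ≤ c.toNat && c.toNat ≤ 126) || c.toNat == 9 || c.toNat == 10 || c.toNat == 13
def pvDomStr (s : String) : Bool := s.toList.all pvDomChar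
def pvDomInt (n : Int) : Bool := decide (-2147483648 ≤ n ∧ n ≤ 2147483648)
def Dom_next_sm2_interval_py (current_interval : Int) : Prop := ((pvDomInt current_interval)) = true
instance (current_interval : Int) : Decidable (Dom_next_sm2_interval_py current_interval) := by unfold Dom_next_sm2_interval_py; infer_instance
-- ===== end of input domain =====

-- B replaces A's index()/try-except + linear fallback with a bisect_right binary search; alternative structure, same values.

def sm2Intervals : List Int := [3, 5, 8, 14, 30]

-- ===== PORT A =====
def next_sm2_interval_py (current_interval : Int) : Int :=
  match PySem.List.index? sm2Intervals current_interval with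
  | some idx =>
      if (idx : Int) < (sm2Intervals.length : Int) - 1 then
        (PySem.List.pyGet? sm2Intervals ((idx : Int) + 1)).getD 0
      else
        (PySem.List.pyGet? sm2Intervals (-1)).getD 0
  | none =>
      -- for iv in SM2_INTERVALS: if iv > current_interval: return iv
      match sm2Intervals.find? (fun iv => decide (iv > current_interval)) with
      | some iv => iv
      | none => (PySem.List.pyGet? sm2Intervals (-1)).getD 0

-- ===== PORT B =====
-- while lo < hi: mid = (lo+hi)//2; if x < a[mid]: hi = mid else lo = mid+1
def bisectRightGo (x : Int) (lo hi : Nat) : Nat :=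
  if lo < hi then
    let mid := (lo + hi) / 2
    if x < (PySem.List.pyGet? sm2Intervals (mid : Int)).getD 0 then
      bisectRightGo x lo mid
    else
      bisectRightGo x (mid + 1) hi
  else lo
termination_by hi - lo
decreasing_by all_goals omega

def next_sm2_interval_py_alt (current_interval : Int) : Int :=
  let lo := bisectRightGo current_interval 0 sm2Intervals.length
  if lo < sm2Intervals.length then
    (PySem.List.pyGet? sm2Intervals (lo : Int)).getD 0
  else
    (PySem.List.pyGet? sm2Intervals (-1)).getD 0

-- ===== PRECONDITION & SPEC =====
def Spec_next_sm2_interval_py (current_interval : Int) (out : Int) : Prop := out = next_sm2_interval_py_alt current_interval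
instance (current_interval : Int) (out : Int) : Decidable (Spec_next_sm2_interval_py current_interval out) := by unfold Spec_next_sm2_interval_py; infer_instance

-- ===== CLAIM (what is proved, stated in full; the proofs are below) =====
def Claim_equal_next_sm2_interval_py : Prop := ∀ (current_interval : Int), Dom_next_sm2_interval_py current_interval → Spec_next_sm2_interval_py current_interval (next_sm2_interval_py current_interval)

-- ===== LEMMAS AND PROOFS =====

-- ===== VERDICT (by name: the statement is the Claim_ definition above) =====
theorem bisect5 (c : Int) : bisectRightGo c 0 5 =
    (if c < 8 then (if c < 5 then (if c < 3 then 0 else 1) else 2)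
     else (if c < 14 then 3 else (if c < 30 then 4 else 5))) := by
  by_cases h3 : c < 3 <;> by_cases h5 : c < 5 <;> by_cases h8 : c < 8 <;>
    by_cases h14 : c < 14 <;> by_cases h30 : c < 30 <;>
    first
      | omega
      | ((repeat (rw [bisectRightGo.eq_def]
                  norm_num [sm2Intervals, PySem.List.pyGet?, PySem.List.pyIdx?, h3, h5, h8, h14, h30]))
         try simp only [show Int.toNat 2 = 2 from rfl, show Int.toNat 3 = 3 from rfl,
                        show Int.toNat 4 = 4 from rfl]
         try norm_num
         try omega
         try (split_ifs <;> omega))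

def sm2Chain (c : Int) : Int :=
  if c < 3 then 3 else if c < 5 then 5 else if c < 8 then 8 else if c < 14 then 14 else 30

theorem A_eq (c : Int) : next_sm2_interval_py c = sm2Chain c := by
  by_cases e3 : c = 3
  · subst e3; decide
  by_cases e5 : c = 5
  · subst e5; decide
  by_cases e8 : c = 8
  · subst e8; decide
  by_cases e14 : c = 14
  · subst e14; decide
  by_cases e30 : c = 30
  · subst e30; decide
  · by_cases h3 : c < 3 <;> by_cases h5 : c < 5 <;> by_cases h8 : c < 8 <;>
      by_cases h14 : c < 14 <;> by_cases h30 : c < 30 <;>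
      first
        | omega
        | simp [next_sm2_interval_py, sm2Chain, sm2Intervals, PySem.List.index?,
            PySem.List.pyGet?, PySem.List.pyIdx?, List.idxOf?, List.findIdx?, List.findIdx?.go,
            List.find?, Ne.symm e3, Ne.symm e5, Ne.symm e8, Ne.symm e14, Ne.symm e30,
            h3, h5, h8, h14, h30]

theorem B_eq (c : Int) : next_sm2_interval_py_alt c = sm2Chain c := by
  unfold next_sm2_interval_py_alt
  rw [show sm2Intervals.length = 5 from rfl, bisect5]
  by_cases h3 : c < 3 <;> by_cases h5 : c < 5 <;> by_cases h8 : c < 8 <;>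
    by_cases h14 : c < 14 <;> by_cases h30 : c < 30 <;>
    simp [sm2Chain, sm2Intervals, PySem.List.pyGet?, PySem.List.pyIdx?, h3, h5, h8, h14, h30] <;>
    omega

theorem next_sm2_interval_py_spec : Claim_equal_next_sm2_interval_py := by
  intro c _
  unfold Spec_next_sm2_interval_py
  rw [A_eq, B_eq]
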